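-- pv_equiv track=rewrite | github.com/mizuking796/kusuri | scripts/new_03_match_names.py | extract_base_en
-- ===== SOURCE A (Python) =====
-- def extract_base_en(name: str) -> str:
--     """英名から基本名を抽出"""
--     base = name.split("(")[0].strip()
--     for suffix in [" hydrochloride", " sodium", " potassium", " calcium",
--                    " maleate", " fumarate", " mesylate", " besylate",
--                    " besilate", " sulfate", " phosphate", " tartrate",
--                    " citrate", " succinate", " acetate", " hydrate",
--                    " dihydrochloride", " monohydrate", " hemihydrate",
--                    " tosylate", " tosilate", " bromide", " chloride",
--                    " nitrate", " oxide", " carbonate",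
--                    " alfa", " beta", " gamma", " delta",
--                    " pivoxil", " marboxil", " proxetil", " axetil",
--                    " medoxomil", " etexilate", " alafenamide",
--                    " disoproxil", " mofetil", " diacetyl"]:
--         if base.lower().endswith(suffix):
--             base = base[:len(base) - len(suffix)].strip()
--             break
--     return base
-- ===== SOURCE B (Python) =====
-- _SUFFIX_WORDS = {"hydrochloride", "sodium", "potassium", "calcium",
--                  "maleate", "fumarate", "mesylate", "besylate",
--                  "besilate", "sulfate", "phosphate", "tartrate",
--                  "citrate", "succinate", "acetate", "hydrate",
--                  "dihydrochloride", "monohydrate", "hemihydrate",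
--                  "tosylate", "tosilate", "bromide", "chloride",
--                  "nitrate", "oxide", "carbonate",
--                  "alfa", "beta", "gamma", "delta",
--                  "pivoxil", "marboxil", "proxetil", "axetil",
--                  "medoxomil", "etexilate", "alafenamide",
--                  "disoproxil", "mofetil", "diacetyl"}
--
-- def extract_base_en(name: str) -> str:
--     """英名から基本名を抽出"""
--     cut = name.find("(")
--     base = (name if cut < 0 else name[:cut]).strip()
--     parts = base.rsplit(" ", 1)
--     if len(parts) == 2 and parts[1].lower() in _SUFFIX_WORDS:
--         return parts[0].strip()
--     return base
-- ===== Notes on version B (the rewrite author's own statement) =====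
-- stated objective: faster
-- what changed: B replaces A's scan over 40 space-prefixed suffixes with endswith on each by locating the opening parenthesis with find, splitting off the last space-separated token once with rsplit, and looking its lowercase form up in a set of suffix words built once.
import Mathlib
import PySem

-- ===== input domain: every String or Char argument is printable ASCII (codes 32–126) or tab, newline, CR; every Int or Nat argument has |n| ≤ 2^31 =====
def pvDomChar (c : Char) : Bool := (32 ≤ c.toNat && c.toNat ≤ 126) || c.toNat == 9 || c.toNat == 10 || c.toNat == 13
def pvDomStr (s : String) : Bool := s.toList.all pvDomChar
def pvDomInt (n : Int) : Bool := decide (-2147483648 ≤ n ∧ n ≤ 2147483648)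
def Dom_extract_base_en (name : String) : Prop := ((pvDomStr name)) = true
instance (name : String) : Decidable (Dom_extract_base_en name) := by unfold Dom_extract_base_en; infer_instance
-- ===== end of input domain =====

-- B replaces A's 40-iteration " suffix"-endswith scan by locating the opening parenthesis with find, splitting off
-- the last space-separated token once and looking its lowercase form up in a word set built once (objective: faster by a constant factor).

-- ===== PORT A =====
def pvSuffixesA : List (List Char) :=
  [" hydrochloride".toList, " sodium".toList, " potassium".toList, " calcium".toList,
   " maleate".toList, " fumarate".toList, " mesylate".toList, " besylate".toList,
   " besilate".toList, " sulfate".toList, " phosphate".toList, " tartrate".toList,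
   " citrate".toList, " succinate".toList, " acetate".toList, " hydrate".toList,
   " dihydrochloride".toList, " monohydrate".toList, " hemihydrate".toList,
   " tosylate".toList, " tosilate".toList, " bromide".toList, " chloride".toList,
   " nitrate".toList, " oxide".toList, " carbonate".toList,
   " alfa".toList, " beta".toList, " gamma".toList, " delta".toList,
   " pivoxil".toList, " marboxil".toList, " proxetil".toList, " axetil".toList,
   " medoxomil".toList, " etexilate".toList, " alafenamide".toList,
   " disoproxil".toList, " mofetil".toList, " diacetyl".toList]

-- the for-loop of A: first suffix with base.lower().endswith(suffix) strips and breaks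
def pvLoopA (base : List Char) : List (List Char) → List Char
  | [] => base
  | suf :: rest =>
      if PySem.Chars.endswith (PySem.Chars.lower base) suf then
        PySem.Chars.strip (PySem.List.slice base none (some ((base.length : Int) - (suf.length : Int))))
      else pvLoopA base rest

def extract_base_en (name : String) : String :=
  let base := PySem.Chars.strip (((PySem.Chars.split? name.toList "(".toList).getD [name.toList]).headD [])
  String.ofList (pvLoopA base pvSuffixesA)

-- ===== PORT B =====
-- the word set, a Python set literal of 40 strings
def pvSuffixWords : PySem.Set (List Char) :=
  PySem.Set.ofList
    ((["hydrochloride", "sodium", "potassium", "calcium",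
       "maleate", "fumarate", "mesylate", "besylate",
       "besilate", "sulfate", "phosphate", "tartrate",
       "citrate", "succinate", "acetate", "hydrate",
       "dihydrochloride", "monohydrate", "hemihydrate",
       "tosylate", "tosilate", "bromide", "chloride",
       "nitrate", "oxide", "carbonate",
       "alfa", "beta", "gamma", "delta",
       "pivoxil", "marboxil", "proxetil", "axetil",
       "medoxomil", "etexilate", "alafenamide",
       "disoproxil", "mofetil", "diacetyl"] : List String).map String.toList)

-- hand-port of base.rsplit(" ", 1) (PySem has no rsplit): exact — at most one split, at the LAST space
def pvRsplitSpace1 (cs : List Char) : List (List Char) :=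
  if ' ' ∈ cs then
    let tok := (cs.reverse.takeWhile (· ≠ ' ')).reverse
    [cs.take (cs.length - tok.length - 1), tok]
  else [cs]

def extract_base_en_alt (name : String) : String :=
  let cut := PySem.Chars.find name.toList "(".toList
  let base := PySem.Chars.strip
    (if cut < 0 then name.toList else PySem.List.slice name.toList none (some cut))
  match pvRsplitSpace1 base with
  | [front, tok] =>
      if PySem.Set.contains pvSuffixWords (PySem.Chars.lower tok) then
        String.ofList (PySem.Chars.strip front)
      else String.ofList base
  | _ => String.ofList base

-- ===== PRECONDITION & SPEC =====
def Spec_extract_base_en (name : String) (out : String) : Prop := out = extract_base_en_alt name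
instance (name : String) (out : String) : Decidable (Spec_extract_base_en name out) := by unfold Spec_extract_base_en; infer_instance

-- ===== CLAIM (what is proved, stated in full; the proofs are below) =====
def Claim_equal_extract_base_en : Prop := ∀ (name : String), Dom_extract_base_en name → Spec_extract_base_en name (extract_base_en name)

-- ===== LEMMAS AND PROOFS =====

-- ---- prefix step: A's split("(")[0] equals B's find-based cut; both are takeWhile (· ≠ '(') ----

lemma pv_singleton_prefix_iff (c : Char) (l : List Char) :
    [c] <+: l ↔ ∃ t, l = c :: t := by
  constructor
  · rintro ⟨r, hr⟩
    exact ⟨r, hr.symm⟩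
  · rintro ⟨t, rfl⟩
    exact ⟨t, rfl⟩

-- head of splitOn.go with nonempty accumulator is the earliest pushed piece
lemma pv_go_head_acc (sep : List Char) (fuel : Nat) :
    ∀ (l cur : List Char) (as : List (List Char)) (a : List Char),
      (PySem.Chars.splitOn.go sep fuel l cur (as ++ [a])).headD [] = a := by
  induction fuel with
  | zero =>
      intro l cur as a
      simp [PySem.Chars.splitOn.go]
  | succ fuel ih =>
      intro l cur as a
      cases l with
      | nil => simp [PySem.Chars.splitOn.go]
      | cons c rest =>
          simp only [PySem.Chars.splitOn.go]
          split
          · have h2 : (cur.reverse :: (as ++ [a])) = (cur.reverse :: as) ++ [a] := by simp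
            rw [h2, ih]
          · exact ih rest (c :: cur) as a

lemma pv_go_head (fuel : Nat) :
    ∀ (l cur : List Char), l.length ≤ fuel →
      (PySem.Chars.splitOn.go ['('] fuel l cur []).headD [] =
        cur.reverse ++ l.takeWhile (· ≠ '(') := by
  induction fuel with
  | zero =>
      intro l cur hl
      have : l = [] := List.eq_nil_of_length_eq_zero (Nat.le_zero.mp hl)
      subst this
      simp [PySem.Chars.splitOn.go]
  | succ fuel ih =>
      intro l cur hl
      cases l with
      | nil => simp [PySem.Chars.splitOn.go]
      | cons c rest =>
          simp only [PySem.Chars.splitOn.go]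
          split
          · rename_i hpre
            have hc : c = '(' := by
              have h1 := (List.isPrefixOf_iff_prefix).mp hpre
              rcases (pv_singleton_prefix_iff '(' (c :: rest)).mp h1 with ⟨t, ht⟩
              exact (List.cons.injEq _ _ _ _ ▸ ht).1
            have h0 : ([] : List (List Char)) ++ [cur.reverse] = [cur.reverse] := rfl
            rw [← h0, pv_go_head_acc]
            rw [List.takeWhile_cons_of_neg (by simp [hc])]
            simp
          · rename_i hpre
            have hc : c ≠ '(' := by
              intro he
              apply hpre
              rw [List.isPrefixOf_iff_prefix, he]
              exact (pv_singleton_prefix_iff '(' ('(' :: rest)).mpr ⟨rest, rfl⟩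
            rw [ih rest (c :: cur) (by simpa using Nat.le_of_succ_le_succ hl),
                List.takeWhile_cons_of_pos (by simp [hc])]
            simp

lemma pv_splitA_head (cs : List Char) :
    ((PySem.Chars.split? cs "(".toList).getD [cs]).headD [] = cs.takeWhile (· ≠ '(') := by
  have h : PySem.Chars.split? cs "(".toList = some (PySem.Chars.splitOn cs ['(']) := by
    simp [PySem.Chars.split?]
  rw [h]
  simp only [Option.getD_some, PySem.Chars.splitOn]
  exact pv_go_head (cs.length + 1) cs [] (by omega)

lemma pv_take_eq_takeWhile (n : Nat) :
    ∀ (cs : List Char), ['('] <+: cs.drop n → (∀ i < n, ¬ ['('] <+: cs.drop i) →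
      cs.take n = cs.takeWhile (· ≠ '(') := by
  induction n with
  | zero =>
      intro cs h _
      rcases (pv_singleton_prefix_iff '(' _).mp (by simpa using h) with ⟨t, ht⟩
      rw [ht]
      simp [List.takeWhile_cons_of_neg]
  | succ n ih =>
      intro cs h hmin
      cases cs with
      | nil => simp at h
      | cons c rest =>
          have hc : c ≠ '(' := by
            intro he
            exact hmin 0 (by omega) (by rw [List.drop_zero, he]
                                        exact (pv_singleton_prefix_iff '(' _).mpr ⟨rest, rfl⟩)
          rw [List.take_succ_cons, List.takeWhile_cons_of_pos (by simp [hc])]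
          rw [ih rest (by simpa using h)
              (fun i hi => by simpa using hmin (i + 1) (by omega))]

lemma pv_findbase (cs : List Char) :
    (if PySem.Chars.find cs "(".toList < 0 then cs
     else PySem.List.slice cs none (some (PySem.Chars.find cs "(".toList))) =
    cs.takeWhile (· ≠ '(') := by
  by_cases hneg : PySem.Chars.find cs "(".toList < 0
  · rw [if_pos hneg]
    have hne : PySem.Chars.find cs "(".toList = -1 := by
      have := PySem.Chars.neg_one_le_find cs "(".toList
      omega
    have hnin := (PySem.Chars.find_eq_neg_one_iff cs "(".toList).mp hne
    have hv : ∀ c ∈ cs, c ≠ '(' := by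
      intro c hc he
      subst he
      rcases List.append_of_mem hc with ⟨s, t, hst⟩
      exact hnin ⟨s, t, by rw [hst]; simp⟩
    rw [List.takeWhile_eq_self_iff.mpr (by intro c hc; simpa using hv c hc)]
  · rw [if_neg hneg]
    have hnn : 0 ≤ PySem.Chars.find cs "(".toList := by omega
    obtain ⟨hpre, hmin⟩ := PySem.Chars.find_spec (s := cs) (sub := "(".toList) hnn
    have hcast : PySem.Chars.find cs "(".toList =
        ((PySem.Chars.find cs "(".toList).toNat : Int) := by omega
    rw [hcast, PySem.List.slice_to_natCast]
    exact pv_take_eq_takeWhile _ cs hpre (fun i hi => hmin i hi)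

-- ---- the suffix step ----

lemma pv_lowerChar_eq_space_iff (c : Char) : PySem.Chars.lowerChar c = ' ' ↔ c = ' ' := by
  simp only [PySem.Chars.lowerChar, PySem.Chars.isupper]
  split
  · rename_i h
    simp only [Bool.and_eq_true, decide_eq_true_eq] at h
    obtain ⟨h1, h2⟩ := h
    have hA : 65 ≤ c.toNat := h1
    have hZ : c.toNat ≤ 90 := h2
    constructor
    · intro he
      exfalso
      have hv : (c.toNat + 32).isValidChar := Or.inl (by omega)
      have := congrArg Char.toNat he
      rw [Char.toNat_ofNat] at this
      simp [hv] at this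
      omega
    · intro he
      subst he
      exfalso
      simp [Char.toNat] at hA
  · simp

lemma pv_mem_space_lower (cs : List Char) : ' ' ∈ PySem.Chars.lower cs ↔ ' ' ∈ cs := by
  simp only [PySem.Chars.lower, List.mem_map]
  constructor
  · rintro ⟨c, hc, he⟩
    rwa [← (pv_lowerChar_eq_space_iff c).mp he]
  · intro h
    exact ⟨' ', h, (pv_lowerChar_eq_space_iff ' ').mpr rfl⟩

lemma pv_length_lower (cs : List Char) : (PySem.Chars.lower cs).length = cs.length := by
  simp [PySem.Chars.lower]

lemma pv_lower_append_space (front tail : List Char) :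
    PySem.Chars.lower (front ++ ' ' :: tail) =
      PySem.Chars.lower front ++ ' ' :: PySem.Chars.lower tail := by
  simp [PySem.Chars.lower]
  rfl

-- key: with no space in `tail` or `w`, " w" is a suffix of "front tail" exactly when w = tail
lemma pv_suffix_space_iff (front tail w : List Char) (ht : ' ' ∉ tail) (hw : ' ' ∉ w) :
    (' ' :: w <:+ front ++ ' ' :: tail) ↔ w = tail := by
  constructor
  · intro h
    have h2 : ' ' :: tail <:+ front ++ ' ' :: tail := List.suffix_append _ _
    rcases List.suffix_or_suffix_of_suffix h h2 with h3 | h3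
    · rcases List.suffix_cons_iff.mp h3 with he | h4
      · exact (List.cons.injEq _ _ _ _ ▸ he).2
      · exact absurd (h4.mem (by simp)) ht
    · rcases List.suffix_cons_iff.mp h3 with he | h4
      · exact ((List.cons.injEq _ _ _ _ ▸ he).2).symm
      · exact absurd (h4.mem (by simp)) hw
  · rintro rfl
    exact List.suffix_append _ _

-- A's loop on a base with no space: every " suffix" test fails
lemma pv_loopA_nospace (cs : List Char) (h : ' ' ∉ cs) (ws : List (List Char)) :
    pvLoopA cs (ws.map (' ' :: ·)) = cs := by
  induction ws with
  | nil => rfl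
  | cons w rest ih =>
      simp only [List.map_cons, pvLoopA]
      rw [if_neg, ih]
      intro hend
      have hsuf := (PySem.Chars.endswith_iff _ _).mp hend
      have : ' ' ∈ PySem.Chars.lower cs := hsuf.mem (by simp)
      exact h ((pv_mem_space_lower cs).mp this)

-- A's loop on a decomposed base: strips iff the lowered last token is one of the words
lemma pv_loopA_split (front tail : List Char) (ws : List (List Char))
    (ht : ' ' ∉ tail) (hws : ∀ w ∈ ws, ' ' ∉ w) :
    pvLoopA (front ++ ' ' :: tail) (ws.map (' ' :: ·)) =
      if PySem.Chars.lower tail ∈ ws then PySem.Chars.strip front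
      else front ++ ' ' :: tail := by
  have htl : ' ' ∉ PySem.Chars.lower tail := fun hx => ht ((pv_mem_space_lower tail).mp hx)
  induction ws with
  | nil => simp [pvLoopA]
  | cons w rest ih =>
      simp only [List.map_cons, pvLoopA]
      by_cases hcond : PySem.Chars.endswith (PySem.Chars.lower (front ++ ' ' :: tail)) (' ' :: w) = true
      · have hsuf := (PySem.Chars.endswith_iff _ _).mp hcond
        rw [pv_lower_append_space] at hsuf
        have hwt : w = PySem.Chars.lower tail :=
          (pv_suffix_space_iff _ _ _ htl (hws w (by simp))).mp hsuf
        have hlen : w.length = tail.length := by rw [hwt, pv_length_lower]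
        rw [if_pos hcond, if_pos (by rw [← hwt]; simp)]
        have harith : ((front ++ ' ' :: tail).length : Int) - ((' ' :: w).length : Int)
            = (front.length : Nat) := by
          simp [hlen]
        rw [harith, PySem.List.slice_to_natCast, List.take_left]
      · rw [if_neg hcond, ih]
        · congr 1
          have hne : PySem.Chars.lower tail ≠ w := by
            intro he
            apply hcond
            rw [PySem.Chars.endswith_iff, pv_lower_append_space]
            exact (pv_suffix_space_iff _ _ _ htl (hws w (by simp))).mpr he.symm
          simp [hne]
        · exact fun w' hw' => hws w' (by simp [hw'])

-- decomposition computed by pvRsplitSpace1 when a space is present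
-- dropWhile (· ≠ ' ') of a list containing a space starts with that space
lemma pv_dropWhile_space (l : List Char) (h : ' ' ∈ l) :
    ∃ t, l.dropWhile (fun x => decide (x ≠ ' ')) = ' ' :: t := by
  induction l with
  | nil => simp at h
  | cons c tl ih =>
      by_cases hc : c = ' '
      · subst hc
        exact ⟨tl, by rw [List.dropWhile_cons_of_neg (by simp)]⟩
      · have hmem : ' ' ∈ tl := by
          rcases List.mem_cons.mp h with h1 | h1
          · exact absurd h1.symm hc
          · exact h1
        obtain ⟨t, ht⟩ := ih hmem
        exact ⟨t, by rw [List.dropWhile_cons_of_pos (by simp [hc])]; exact ht⟩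

lemma pv_rsplit_decomp (cs : List Char) (h : ' ' ∈ cs) :
    cs = cs.take (cs.length - ((cs.reverse.takeWhile (· ≠ ' ')).reverse).length - 1)
           ++ ' ' :: (cs.reverse.takeWhile (· ≠ ' ')).reverse
      ∧ ' ' ∉ (cs.reverse.takeWhile (· ≠ ' ')).reverse := by
  have hr : ' ' ∈ cs.reverse := by simpa using h
  obtain ⟨t, htail⟩ := pv_dropWhile_space cs.reverse hr
  have hnos : ' ' ∉ (cs.reverse.takeWhile (fun x => decide (x ≠ ' '))).reverse := by
    intro hx
    have hx' := List.all_eq_true.mp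
      (List.all_takeWhile (p := fun x => decide (x ≠ ' ')) (l := cs.reverse)) ' ' (by simpa using hx)
    simp at hx'
  obtain ⟨tw, htw⟩ : ∃ tw, (cs.reverse.takeWhile (fun x => decide (x ≠ ' '))).reverse = tw := ⟨_, rfl⟩
  have hcs : cs = t.reverse ++ ' ' :: tw := by
    have h2 := congrArg List.reverse
      (List.takeWhile_append_dropWhile (p := fun x => decide (x ≠ ' ')) (l := cs.reverse))
    rw [htail] at h2
    rw [← htw]
    simpa using h2.symm
  rw [htw] at hnos ⊢
  refine ⟨?_, hnos⟩
  have hcount : (t.reverse ++ ' ' :: tw).length - tw.length - 1 = t.reverse.length := by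
    simp only [List.length_append, List.length_cons, List.length_reverse]
    omega
  rw [hcs, hcount, List.take_left]

-- the two concrete tables line up: A's suffixes are " " ++ B's words, in order
set_option maxRecDepth 8192 in
lemma pv_tables : pvSuffixesA = pvSuffixWords.map (' ' :: ·) := by decide

set_option maxRecDepth 8192 in
lemma pv_words_nospace : ∀ w ∈ pvSuffixWords, ' ' ∉ w := by decide

-- the whole computation after the shared prefix/strip step, on the character list
set_option maxRecDepth 8192 in
lemma pv_core (base : List Char) :
    String.ofList (pvLoopA base pvSuffixesA) =
      (match pvRsplitSpace1 base with
       | [front, tok] =>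
           if PySem.Set.contains pvSuffixWords (PySem.Chars.lower tok) then
             String.ofList (PySem.Chars.strip front)
           else String.ofList base
       | _ => String.ofList base) := by
  unfold pvRsplitSpace1
  rw [pv_tables]
  by_cases hsp : ' ' ∈ base
  · obtain ⟨hdec, hnos⟩ := pv_rsplit_decomp base hsp
    rw [if_pos hsp]
    show String.ofList (pvLoopA base (pvSuffixWords.map (' ' :: ·))) =
      if PySem.Set.contains pvSuffixWords
          (PySem.Chars.lower ((base.reverse.takeWhile (· ≠ ' ')).reverse)) then
        String.ofList (PySem.Chars.strip
          (base.take (base.length - ((base.reverse.takeWhile (· ≠ ' ')).reverse).length - 1)))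
      else String.ofList base
    conv_lhs => rw [hdec]
    rw [pv_loopA_split _ _ _ hnos pv_words_nospace]
    by_cases hmem : PySem.Chars.lower ((base.reverse.takeWhile (· ≠ ' ')).reverse) ∈ pvSuffixWords
    · have hc : PySem.Set.contains pvSuffixWords
          (PySem.Chars.lower ((base.reverse.takeWhile (· ≠ ' ')).reverse)) = true :=
        List.elem_eq_true_of_mem hmem
      rw [if_pos hmem, if_pos hc]
    · have hc : ¬ (PySem.Set.contains pvSuffixWords
          (PySem.Chars.lower ((base.reverse.takeWhile (· ≠ ' ')).reverse)) = true) :=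
        fun hcon => hmem (List.mem_of_elem_eq_true hcon)
      rw [if_neg hmem, if_neg hc, ← hdec]
  · rw [if_neg hsp]
    show String.ofList (pvLoopA base (pvSuffixWords.map (' ' :: ·))) = String.ofList base
    rw [pv_loopA_nospace base hsp]

-- ===== VERDICT (by name: the statement is the Claim_ definition above) =====
theorem extract_base_en_spec : Claim_equal_extract_base_en := by
  intro name _
  unfold Spec_extract_base_en extract_base_en extract_base_en_alt
  simp only [pv_splitA_head, pv_findbase]
  exact pv_core (PySem.Chars.strip (name.toList.takeWhile (· ≠ '(')))
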